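-- pv_equiv track=rewrite | github.com/Qufel/matura | 2018/zad4.py | third
-- ===== SOURCE A (Python) =====
-- def third(dane):
--
--     words = []
--
--     for word in dane:
--         for i in range(len(word)):
--             is_larger = False
--             for j in range(len(word)):
--                 if(abs(ord(word[i]) - ord(word[j])) > 10):
--                     is_larger = True
--                     break
--             if(is_larger):
--                 break
--         else:
--             words.append(word)
--
--     return words
-- ===== SOURCE B (Python) =====
-- def third(dane):
--     # keep a word iff the spread of its character ordinals is at most 10;
--     # empty words are kept (they trivially have no pair exceeding the spread)
--     return [w for w in dane if not w or ord(max(w)) - ord(min(w)) <= 10]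
-- ===== Notes on version B (the rewrite author's own statement) =====
-- stated objective: faster
-- what changed: Replaces the O(L^2) all-pairs ordinal comparison per word by a single min/max spread test (max-min <= 10), expressed as one list comprehension.
import Mathlib
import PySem

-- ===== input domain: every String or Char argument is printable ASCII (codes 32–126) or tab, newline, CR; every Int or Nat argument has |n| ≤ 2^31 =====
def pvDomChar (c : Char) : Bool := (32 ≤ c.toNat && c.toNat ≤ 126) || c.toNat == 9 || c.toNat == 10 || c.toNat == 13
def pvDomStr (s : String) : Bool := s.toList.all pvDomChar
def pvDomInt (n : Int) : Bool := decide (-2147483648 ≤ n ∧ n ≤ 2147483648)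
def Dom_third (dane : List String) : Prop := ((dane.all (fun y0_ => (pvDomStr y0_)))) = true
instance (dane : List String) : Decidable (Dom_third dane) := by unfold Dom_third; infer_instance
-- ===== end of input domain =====

-- B replaces A's all-pairs ordinal comparison per word by a single max/min spread test (simpler and asymptotically faster per word).

-- ===== PORT A =====
-- the nested index loops with break/for-else: a word is dropped iff some pair of its
-- characters has ordinal distance > 10 (break = short-circuit, ported as List.any)
def third (dane : List String) : List String :=
  dane.foldl (fun words word =>
    if word.toList.any (fun ci => word.toList.any (fun cj =>
        10 < ((ci.toNat : Int) - (cj.toNat : Int)).natAbs)) then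
      words
    else
      words ++ [word]) []

-- ===== PORT B =====
-- keep w iff w is empty or ord(max(w)) - ord(min(w)) ≤ 10 (running max/min = Python's max/min on a string)
def third_alt (dane : List String) : List String :=
  dane.filter (fun w =>
    match w.toList with
    | [] => true
    | c :: t => (t.foldl max c).toNat - (t.foldl min c).toNat ≤ 10)

-- ===== PRECONDITION & SPEC =====
def Spec_third (dane : List String) (out : List String) : Prop := out = third_alt dane
instance (dane : List String) (out : List String) : Decidable (Spec_third dane out) := by unfold Spec_third; infer_instance

-- ===== CLAIM (what is proved, stated in full; the proofs are below) =====
def Claim_equal_third : Prop := ∀ (dane : List String), Dom_third dane → Spec_third dane (third dane)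

-- ===== LEMMAS AND PROOFS =====

-- A's per-word test and B's per-word test agree on every word
theorem pv_word_eq (w : String) :
    (! w.toList.any (fun ci => w.toList.any (fun cj =>
        10 < ((ci.toNat : Int) - (cj.toNat : Int)).natAbs)))
    = (match w.toList with
       | [] => true
       | c :: t => decide ((t.foldl max c).toNat - (t.foldl min c).toNat ≤ 10)) := by
  cases h : w.toList with
  | nil => simp
  | cons c t =>
    have hmax := PySem.List.le_foldl_max t c
    have hmin := PySem.List.foldl_min_le t c
    have hM : ∀ y ∈ c :: t, y ≤ t.foldl max c := by
      intro y hy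
      rcases List.mem_cons.mp hy with rfl | hy
      · exact hmax.1
      · exact hmax.2 _ hy
    have hm : ∀ y ∈ c :: t, t.foldl min c ≤ y := by
      intro y hy
      rcases List.mem_cons.mp hy with rfl | hy
      · exact hmin.1
      · exact hmin.2 _ hy
    have hMmem : t.foldl max c ∈ c :: t := by
      rcases PySem.List.foldl_max_mem t c with h' | h'
      · rw [h']; exact List.mem_cons_self
      · exact List.mem_cons_of_mem _ h'
    have hmmem : t.foldl min c ∈ c :: t := by
      rcases PySem.List.foldl_min_mem t c with h' | h'
      · rw [h']; exact List.mem_cons_self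
      · exact List.mem_cons_of_mem _ h'
    rw [Bool.eq_iff_iff]
    simp only [Bool.not_eq_true', List.any_eq_false, decide_eq_true_eq]
    constructor
    · intro hall
      have h1 := hall _ hMmem
      rw [List.any_eq_true] at h1
      push Not at h1
      have hpair : ¬ (10 < ((((t.foldl max c).toNat : Int)) - (((t.foldl min c).toNat : Int))).natAbs) := by
        simpa using h1 _ hmmem
      have hle : (t.foldl min c).toNat ≤ (t.foldl max c).toNat :=
        (hm _ hMmem : t.foldl min c ≤ t.foldl max c)
      omega
    · intro hspread ci hci hinner
      rw [List.any_eq_true] at hinner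
      rcases hinner with ⟨cj, hcj, hlt⟩
      simp only [decide_eq_true_eq] at hlt
      have e1 : ci.toNat ≤ (t.foldl max c).toNat := hM _ hci
      have e2 : (t.foldl min c).toNat ≤ ci.toNat := hm _ hci
      have e3 : cj.toNat ≤ (t.foldl max c).toNat := hM _ hcj
      have e4 : (t.foldl min c).toNat ≤ cj.toNat := hm _ hcj
      omega

theorem pv_foldl_filter (dane : List String) (acc : List String) :
    dane.foldl (fun words word =>
      if word.toList.any (fun ci => word.toList.any (fun cj =>
          10 < ((ci.toNat : Int) - (cj.toNat : Int)).natAbs)) then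
        words
      else
        words ++ [word]) acc
    = acc ++ dane.filter (fun w =>
        ! w.toList.any (fun ci => w.toList.any (fun cj =>
            10 < ((ci.toNat : Int) - (cj.toNat : Int)).natAbs))) := by
  induction dane generalizing acc with
  | nil => simp
  | cons w t ih =>
    simp only [List.foldl_cons, List.filter_cons]
    by_cases hb : w.toList.any (fun ci => w.toList.any (fun cj =>
        10 < ((ci.toNat : Int) - (cj.toNat : Int)).natAbs)) = true
    · rw [if_pos hb, ih, hb]; simp
    · simp only [Bool.not_eq_true] at hb
      rw [if_neg (by simp [hb]), ih, hb]; simp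

-- ===== VERDICT (by name: the statement is the Claim_ definition above) =====
theorem third_spec : Claim_equal_third := by
  intro dane _
  unfold Spec_third third third_alt
  rw [pv_foldl_filter]
  simp only [List.nil_append]
  apply List.filter_congr
  intro w _
  rw [pv_word_eq w]
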